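-- pv_equiv track=rewrite | github.com/USTC-Hackergame/hackergame2022-writeups | players/Testla/17-惜字如金/main.py | recover_word
-- ===== SOURCE A (Python) =====
-- import typing
--
-- def is_consonant(c: str) -> bool:
--     return c.lower() not in 'aeiou'
--
-- def recover_word_recur(
--     char_index: int,
--     final_consonant_index: int,
--     parts: typing.List[str],
--     remaining_length_growth: int,
--     origin_length: int,
-- ) -> typing.Generator[str, None, None]:
--     if char_index == final_consonant_index:
--         parts[char_index] = parts[char_index][0] * (1 + remaining_length_growth)
--         yield ''.join(parts)
--         if char_index == origin_length - 1 and remaining_length_growth > 0: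
--             parts[char_index] = parts[char_index][0] * (1 + remaining_length_growth - 1) + 'e'
--             yield ''.join(parts)
--         # raise StopIteration
--         return
--     for this_char_growth in range((remaining_length_growth if is_consonant(parts[char_index][0]) else 0) + 1):
--         parts[char_index] = parts[char_index][0] * (1 + this_char_growth)
--         yield from recover_word_recur(
--             char_index + 1,
--             final_consonant_index,
--             parts,
--             remaining_length_growth - this_char_growth,
--             origin_length
--         )
--
-- def recover_word(word: str, length_growth: int) -> typing.Generator[str, None, None]:
--     final_consonant_index = max(
--         i for i in range(len(word))
--         if is_consonant(word[i])
--     )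
--     parts = list(word)
--     yield from recover_word_recur(
--         0,
--         final_consonant_index,
--         parts,
--         length_growth,
--         len(word),
--     )
-- ===== SOURCE B (Python) =====
-- import typing
--
-- def is_consonant(c: str) -> bool:
--     return c.lower() not in 'aeiou'
--
-- def recover_word(word: str, length_growth: int) -> typing.Generator[str, None, None]:
--     # Breadth-first: materialise every growth tuple for the consonants before the
--     # last one (left-to-right product), then render each tuple into its string(s).
--     cons = [i for i in range(len(word)) if is_consonant(word[i])]
--     last = max(cons)
--     pre = cons[:-1]
--     tuples = [[]]
--     for _ in pre:
--         tuples = [t + [g] for t in tuples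
--                   for g in range(length_growth - sum(t) + 1)]
--     for t in tuples:
--         rem = length_growth - sum(t)
--         counts = dict(zip(pre, t))
--         s = ''.join(c * (1 + rem) if i == last else c * (1 + counts.get(i, 0))
--                     for i, c in enumerate(word))
--         yield s
--         if last == len(word) - 1 and rem > 0:
--             yield s[:-1] + 'e'
-- ===== Notes on version B (the rewrite author's own statement) =====
-- stated objective: alternative
-- what changed: B replaces A's depth-first recursive generator that mutates a shared parts buffer by a breadth-first enumeration: it materialises all growth tuples for the pre-final consonants with a fold of flatMaps and renders each tuple into its string(s) independently (growth looked up per position), in the same emission order.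
import Mathlib
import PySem

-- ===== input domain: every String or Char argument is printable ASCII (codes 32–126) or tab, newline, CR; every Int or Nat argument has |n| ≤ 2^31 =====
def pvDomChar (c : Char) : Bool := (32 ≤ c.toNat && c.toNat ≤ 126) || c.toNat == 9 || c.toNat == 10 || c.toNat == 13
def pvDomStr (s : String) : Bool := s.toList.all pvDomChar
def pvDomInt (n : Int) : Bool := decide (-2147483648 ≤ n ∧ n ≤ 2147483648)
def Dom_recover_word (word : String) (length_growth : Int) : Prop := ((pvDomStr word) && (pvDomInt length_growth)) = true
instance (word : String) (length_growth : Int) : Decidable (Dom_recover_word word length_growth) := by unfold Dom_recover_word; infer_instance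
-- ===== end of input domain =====

-- B materialises all growth tuples breadth-first (a fold of flatMaps) and renders each tuple
-- independently, instead of A's depth-first recursive generator mutating a parts buffer ("alternative").
-- Both Pythons are generators; equivalence is about the produced sequence of strings.

-- ===== PORT A =====

-- is_consonant(c): c.lower() not in 'aeiou'
def pvIsCons (c : Char) : Bool := !(PySem.Chars.isIn (PySem.Chars.lower [c]) ['a', 'e', 'i', 'o', 'u'])

-- Python's  single_char * n  (clamps n ≤ 0 to the empty string)
def pvRep (c : Char) (n : Int) : List Char := List.replicate n.toNat c

-- recover_word_recur; a part is a List Char, ''.join(parts) = parts.flatten.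
-- fuel = final_consonant_index - char_index ticks down; fuel 0 with ci ≠ fci is unreachable.
def pvRecurA (w : List Char) (fci origin : Nat) (fuel : Nat) (ci : Nat) (parts : List (List Char))
    (rem : Int) : List String × List (List Char) :=
  if ci = fci then
    let c := (parts.getD ci []).headD ' '
    let parts1 := parts.set ci (pvRep c (1 + rem))
    let out1 := String.ofList parts1.flatten
    if ci = origin - 1 ∧ 0 < rem then
      let c2 := (parts1.getD ci []).headD ' '
      let parts2 := parts1.set ci (pvRep c2 (1 + rem - 1) ++ ['e'])
      ([out1, String.ofList parts2.flatten], parts2)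
    else ([out1], parts1)
  else
    match fuel with
    | 0 => ([], parts)
    | fuel' + 1 =>
      let c0 := (parts.getD ci []).headD ' '
      (PySem.List.pyRange 0 ((if pvIsCons c0 then rem else 0) + 1) 1).foldl
        (fun st g =>
          let c := (st.2.getD ci []).headD ' '
          let parts' := st.2.set ci (pvRep c (1 + g))
          let r := pvRecurA w fci origin fuel' (ci + 1) parts' (rem - g)
          (st.1 ++ r.1, r.2))
        ([], parts)
termination_by fuel

def recover_word (word : String) (length_growth : Int) : List String :=
  let w := word.toList
  let cons := (List.range w.length).filter (fun i => pvIsCons (w.getD i ' '))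
  match PySem.List.max? cons (fun i => i) with
  | none => []   -- Python: max() of an empty generator raises ValueError (excluded by Pre_)
  | some fci => (pvRecurA w fci w.length fci 0 (w.map (fun c => [c])) length_growth).1

-- ===== PORT B =====

def recover_word_alt (word : String) (length_growth : Int) : List String :=
  let w := word.toList
  let cons := (List.range w.length).filter (fun i => pvIsCons (w.getD i ' '))
  match PySem.List.max? cons (fun i => i) with
  | none => []   -- max(cons) on an empty list raises ValueError (excluded by Pre_)
  | some last =>
    let pre := PySem.List.slice cons none (some (-1))
    let tuples := pre.foldl
      (fun ts _ => ts.flatMap (fun t =>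
        (PySem.List.pyRange 0 (length_growth - t.sum + 1) 1).map (fun g => t ++ [g])))
      [([] : List Int)]
    tuples.flatMap (fun t =>
      let rem := length_growth - t.sum
      let counts := PySem.Dict.ofList (pre.zip t)
      let s := ((List.range w.length).map (fun i =>
        let c := w.getD i ' '
        if i = last then pvRep c (1 + rem) else pvRep c (1 + counts.getD i 0))).flatten
      String.ofList s ::
        (if last = w.length - 1 ∧ 0 < rem then
          [String.ofList (PySem.List.slice s none (some (-1)) ++ ['e'])] else []))

-- ===== PRECONDITION & SPEC =====
-- Pre_ excludes exactly the words with no consonant character (in particular the empty word),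
-- on which the Python A raises ValueError (max() of an empty generator).
def Pre_recover_word (word : String) (length_growth : Int) : Prop :=
  word.toList.any (fun c => pvIsCons c) = true
instance (word : String) (length_growth : Int) : Decidable (Pre_recover_word word length_growth) := by
  unfold Pre_recover_word; infer_instance

def pvWitness_recover_word : String × Int := ("ab", 2)

def Spec_recover_word (word : String) (length_growth : Int) (out : List String) : Prop :=
  out = recover_word_alt word length_growth
instance (word : String) (length_growth : Int) (out : List String) :
    Decidable (Spec_recover_word word length_growth out) := by
  unfold Spec_recover_word; infer_instance

-- ===== CLAIM (what is proved, stated in full; the proofs are below) =====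
def Claim_equal_recover_word : Prop := ∀ (word : String) (length_growth : Int),
  Dom_recover_word word length_growth → Pre_recover_word word length_growth →
    Spec_recover_word word length_growth (recover_word word length_growth)

-- ===== LEMMAS AND PROOFS =====

-- The common specification: pvE w fci fuel ci rem is the list of rendered suffixes (from
-- position ci to the end of the word) that the Python recursion emits, as char lists.
def pvE (w : List Char) (fci : Nat) (fuel : Nat) (ci : Nat) (rem : Int) : List (List Char) :=
  if ci = fci then
    [pvRep (w.getD fci ' ') (1 + rem) ++ w.drop (fci + 1)] ++
      (if fci = w.length - 1 ∧ 0 < rem then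
        [pvRep (w.getD fci ' ') (1 + rem - 1) ++ ['e'] ++ w.drop (fci + 1)] else [])
  else
    match fuel with
    | 0 => []
    | fuel' + 1 =>
      (PySem.List.pyRange 0 ((if pvIsCons (w.getD ci ' ') then rem else 0) + 1) 1).flatMap
        (fun g => (pvE w fci fuel' (ci + 1) (rem - g)).map
          (fun suf => pvRep (w.getD ci ' ') (1 + g) ++ suf))
termination_by fuel

-- all growth tuples of length n with nonneg entries and sum ≤ rem, in A's emission order
def pvT (n : Nat) (rem : Int) : List (List Int) :=
  match n with
  | 0 => [[]]
  | n' + 1 => (PySem.List.pyRange 0 (rem + 1) 1).flatMap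
      (fun g => (pvT n' (rem - g)).map (fun t => g :: t))

def pvLook : List (Nat × Int) → Nat → Int
  | [], _ => 0
  | (k, v) :: r, i => if k = i then v else pvLook r i

def pvConsList (w : List Char) (ci fci : Nat) : List Nat :=
  (List.range' ci (fci - ci)).filter (fun i => pvIsCons (w.getD i ' '))

def pvRender (w : List Char) (fci ci : Nat) (asg : List (Nat × Int)) (rem : Int) : List Char :=
  ((List.range' ci (w.length - ci)).map (fun i =>
    if i = fci then pvRep (w.getD i ' ') (1 + rem)
    else pvRep (w.getD i ' ') (1 + pvLook asg i))).flatten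

def pvOuts (w : List Char) (fci ci : Nat) (asg : List (Nat × Int)) (rem : Int) : List (List Char) :=
  pvRender w fci ci asg rem ::
    (if fci = w.length - 1 ∧ 0 < rem then [(pvRender w fci ci asg rem).dropLast ++ ['e']] else [])

lemma pvFlattenSingles (l : List α) : (l.map (fun c => [c])).flatten = l := by
  induction l with
  | nil => rfl
  | cons a l ih => simp [ih]

lemma pvRangeCons {k n : Nat} (h : 0 < n) : List.range' k n = k :: List.range' (k + 1) (n - 1) := by
  cases n with
  | zero => omega
  | succ m => simp [List.range'_succ]

lemma pvDropFlatten (w : List Char) (parts : List (List Char)) (k : Nat)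
    (hlen : parts.length = w.length)
    (hs : ∀ j, k ≤ j → j < w.length → parts.getD j [] = [w.getD j ' ']) :
    (parts.drop k).flatten = w.drop k := by
  have h : parts.drop k = (w.drop k).map (fun c => [c]) := by
    apply List.ext_getElem
    · simp [hlen]
    · intro i h1 h2
      have hki : k + i < w.length := by simp at h2; omega
      have := hs (k + i) (by omega) hki
      rw [List.getD_eq_getElem parts [] (by omega), List.getD_eq_getElem w ' ' hki] at this
      simp [this]
  rw [h, pvFlattenSingles]

-- B-side lemmas (appended to defs for testing)
lemma pvLook_zero (asg : List (Nat × Int)) (i : Nat) (h : ∀ p ∈ asg, i < p.1) :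
    pvLook asg i = 0 := by
  induction asg with
  | nil => rfl
  | cons a r ih =>
    obtain ⟨k, v⟩ := a
    have hk := h (k, v) (by simp)
    simp only [pvLook, if_neg (by simp at hk; omega : ¬ k = i)]
    exact ih (fun p hp => h p (by simp [hp]))

lemma pvRender_step (w : List Char) (fci ci : Nat) (asg : List (Nat × Int)) (rem : Int)
    (h : ci < w.length) :
    pvRender w fci ci asg rem
      = (if ci = fci then pvRep (w.getD ci ' ') (1 + rem)
          else pvRep (w.getD ci ' ') (1 + pvLook asg ci)) ++ pvRender w fci (ci + 1) asg rem := by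
  unfold pvRender
  rw [pvRangeCons (by omega : 0 < w.length - ci)]
  rw [Nat.sub_sub]
  simp

lemma pvRender_congr (w : List Char) (fci ci : Nat) (A A' : List (Nat × Int)) (rem : Int)
    (h : ∀ i, ci ≤ i → pvLook A i = pvLook A' i) :
    pvRender w fci ci A rem = pvRender w fci ci A' rem := by
  unfold pvRender
  congr 1
  apply List.map_congr_left
  intro i hi
  rw [h i (List.mem_range'_1.mp hi).1]

lemma pvRender_ne_nil (w : List Char) (fci ci : Nat) (asg : List (Nat × Int)) (rem : Int)
    (h1 : ci ≤ fci) (h2 : fci < w.length) (h3 : 0 < rem) :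
    pvRender w fci ci asg rem ≠ [] := by
  unfold pvRender
  intro h
  rw [List.flatten_eq_nil_iff] at h
  have hmem : fci ∈ List.range' ci (w.length - ci) := by
    rw [List.mem_range'_1]; omega
  have := h (if fci = fci then pvRep (w.getD fci ' ') (1 + rem)
      else pvRep (w.getD fci ' ') (1 + pvLook asg fci)) (List.mem_map_of_mem hmem)
  rw [if_pos rfl] at this
  unfold pvRep at this
  have : (1 + rem).toNat = 0 := by
    have := congrArg List.length this; simpa using this
  omega

lemma pvOuts_step (w : List Char) (fci ci : Nat) (asg : List (Nat × Int)) (rem : Int)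
    (h1 : ci < fci) (h2 : fci < w.length) (B : List Char)
    (hB : pvRender w fci ci asg rem = B ++ pvRender w fci (ci + 1) asg rem) :
    pvOuts w fci ci asg rem = (pvOuts w fci (ci + 1) asg rem).map (fun suf => B ++ suf) := by
  unfold pvOuts
  split_ifs with hc
  · obtain ⟨hlast, hrem⟩ := hc
    have hne := pvRender_ne_nil w fci (ci + 1) asg rem (by omega) h2 hrem
    simp [hB, List.dropLast_append_of_ne_nil hne, List.append_assoc]
  · simp [hB]

lemma pvRangeSingles (w : List Char) : ∀ (n k : Nat), n = w.length - k →
    ((List.range' k n).map (fun i => [w.getD i ' '])).flatten = w.drop k := by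
  intro n
  induction n with
  | zero => intro k hk; simp [List.drop_eq_nil_of_le (by omega : w.length ≤ k)]
  | succ n ih =>
    intro k hk
    have hklt : k < w.length := by omega
    rw [pvRangeCons (by omega : 0 < n + 1)]
    simp only [Nat.add_sub_cancel, List.map_cons, List.flatten_cons]
    rw [ih (k + 1) (by omega), List.drop_eq_getElem_cons hklt,
      List.getD_eq_getElem w ' ' hklt]
    rfl

lemma pvConsList_nil (w : List Char) (fci : Nat) : pvConsList w fci fci = [] := by
  simp [pvConsList]

lemma pvConsList_step (w : List Char) (ci fci : Nat) (h : ci < fci) :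
    pvConsList w ci fci
      = if pvIsCons (w.getD ci ' ') then ci :: pvConsList w (ci + 1) fci
        else pvConsList w (ci + 1) fci := by
  unfold pvConsList
  rw [pvRangeCons (by omega : 0 < fci - ci), Nat.sub_sub, List.filter_cons]

lemma pvConsList_gt (w : List Char) (ci fci : Nat) (j : Nat) (h : j ∈ pvConsList w ci fci) :
    ci ≤ j ∧ j < fci := by
  unfold pvConsList at h
  have := List.mem_range'_1.mp (List.mem_of_mem_filter h)
  omega

lemma pvFlatMapMap (l : List α) (f : α → β) (g : β → List γ) :
    (l.map f).flatMap g = l.flatMap (fun x => g (f x)) := by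
  induction l with
  | nil => rfl
  | cons a l ih => simp [ih]

lemma pvOuts_congr (w : List Char) (fci ci : Nat) (A A' : List (Nat × Int)) (rem : Int)
    (h : ∀ i, ci ≤ i → pvLook A i = pvLook A' i) :
    pvOuts w fci ci A rem = pvOuts w fci ci A' rem := by
  unfold pvOuts
  rw [pvRender_congr w fci ci A A' rem h]

lemma pvE_eq_T (w : List Char) (fci : Nat) (hf : fci < w.length) :
    ∀ fuel ci rem, ci + fuel = fci →
      pvE w fci fuel ci rem
        = (pvT (pvConsList w ci fci).length rem).flatMap
            (fun t => pvOuts w fci ci ((pvConsList w ci fci).zip t) (rem - t.sum)) := by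
  intro fuel
  induction fuel with
  | zero =>
    intro ci rem hci
    have hfc : ci = fci := by omega
    subst hfc
    rw [pvConsList_nil]
    simp only [List.length_nil]
    rw [pvE, pvT]
    rw [if_pos rfl]
    simp only [List.flatMap_cons, List.flatMap_nil, List.append_nil,
      List.zip_nil_left, List.sum_nil, sub_zero]
    unfold pvOuts
    have hrend : pvRender w ci ci [] rem
        = pvRep (w.getD ci ' ') (1 + rem) ++ w.drop (ci + 1) := by
      rw [pvRender_step w ci ci [] rem hf, if_pos rfl]
      congr 1
      unfold pvRender
      have hmc : ∀ i ∈ List.range' (ci + 1) (w.length - (ci + 1)),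
          (if i = ci then pvRep (w.getD i ' ') (1 + rem)
            else pvRep (w.getD i ' ') (1 + pvLook [] i)) = [w.getD i ' '] := by
        intro i hi
        have := List.mem_range'_1.mp hi
        rw [if_neg (by omega), pvLook]
        rfl
      rw [List.map_congr_left hmc, pvRangeSingles w (w.length - (ci + 1)) (ci + 1) rfl]
    rw [hrend]
    by_cases hcc : ci = w.length - 1 ∧ 0 < rem
    · obtain ⟨hlast, hrem⟩ := hcc
      have hdrop : w.drop (ci + 1) = ([] : List Char) :=
        List.drop_eq_nil_of_le (by omega)
      have hvar : pvRep (w.getD ci ' ') (1 + rem - 1) ++ ['e'] ++ w.drop (ci + 1)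
          = (pvRep (w.getD ci ' ') (1 + rem) ++ w.drop (ci + 1)).dropLast ++ ['e'] := by
        rw [hdrop]
        simp only [List.append_nil]
        unfold pvRep
        rw [List.dropLast_replicate]
        have h1 : (1 + rem - 1).toNat = (1 + rem).toNat - 1 := by omega
        rw [h1]
      rw [if_pos ⟨hlast, hrem⟩, if_pos ⟨hlast, hrem⟩, hvar]
      rfl
    · rw [if_neg hcc, if_neg hcc]
      rfl
  | succ fuel ih =>
    intro ci rem hci
    have hlt : ci < fci := by omega
    have hcilt : ci < w.length := by omega
    rw [pvE, if_neg (by omega : ¬ ci = fci), pvConsList_step w ci fci hlt]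
    have hkeys : ∀ t : List Int, ∀ p ∈ (pvConsList w (ci + 1) fci).zip t, ci < p.1 := by
      intro t p hp
      obtain ⟨x, y⟩ := p
      have := (List.of_mem_zip hp).1
      have := pvConsList_gt w (ci + 1) fci x this
      simpa using (by omega : ci < x)
    by_cases hp : pvIsCons (w.getD ci ' ') = true
    · -- consonant position: the loop runs over range(rem + 1)
      rw [if_pos hp, if_pos hp]
      simp only [List.length_cons]
      rw [pvT, List.flatMap_assoc]
      congr 1
      funext g
      rw [ih (ci + 1) (rem - g) (by omega), pvFlatMapMap, List.map_flatMap]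
      congr 1
      funext t
      have hstep : pvOuts w fci ci ((ci :: pvConsList w (ci + 1) fci).zip (g :: t)) (rem - (g :: t).sum)
          = (pvOuts w fci (ci + 1) ((ci :: pvConsList w (ci + 1) fci).zip (g :: t)) (rem - (g :: t).sum)).map
              (fun suf => pvRep (w.getD ci ' ') (1 + g) ++ suf) := by
        apply pvOuts_step w fci ci _ _ hlt hf
        rw [pvRender_step w fci ci _ _ hcilt, if_neg (by omega : ¬ ci = fci)]
        simp [List.zip_cons_cons, pvLook]
      rw [hstep]
      have hcg : pvOuts w fci (ci + 1) ((ci :: pvConsList w (ci + 1) fci).zip (g :: t)) (rem - (g :: t).sum)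
          = pvOuts w fci (ci + 1) ((pvConsList w (ci + 1) fci).zip t) (rem - g - t.sum) := by
        have hsum : rem - (g :: t).sum = rem - g - t.sum := by simp [List.sum_cons]; ring
        rw [hsum]
        apply pvOuts_congr
        intro i hi
        simp [List.zip_cons_cons, pvLook, if_neg (by omega : ¬ ci = i)]
      rw [hcg]
    · -- vowel position: the loop is range(1) = [0]
      rw [if_neg hp, if_neg hp]
      have h01 : PySem.List.pyRange 0 (0 + 1) 1 = [(0 : Int)] := PySem.List.pyRange_one_singleton 0
      rw [h01]
      simp only [List.flatMap_cons, List.flatMap_nil, List.append_nil, sub_zero, Int.add_zero]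
      rw [ih (ci + 1) rem (by omega), List.map_flatMap]
      congr 1
      funext t
      have hstep : pvOuts w fci ci ((pvConsList w (ci + 1) fci).zip t) (rem - t.sum)
          = (pvOuts w fci (ci + 1) ((pvConsList w (ci + 1) fci).zip t) (rem - t.sum)).map
              (fun suf => pvRep (w.getD ci ' ') (1 + 0) ++ suf) := by
        apply pvOuts_step w fci ci _ _ hlt hf
        rw [pvRender_step w fci ci _ _ hcilt, if_neg (by omega : ¬ ci = fci)]
        rw [pvLook_zero _ ci (hkeys t)]
      rw [hstep]
      norm_num

lemma pvSetGetDNe (l : List (List Char)) (i j : Nat) (v : List Char) (h : i ≠ j) :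
    (l.set i v).getD j [] = l.getD j [] := by
  simp [List.getD_eq_getElem?_getD, List.getElem?_set_ne h]

lemma pvSetGetDSelf (l : List (List Char)) (i : Nat) (v : List Char) (h : i < l.length) :
    (l.set i v).getD i [] = v := by
  simp [List.getD_eq_getElem?_getD, h]

lemma pvGetDTake (xs ys : List (List Char)) (k j : Nat) (h : xs.take k = ys.take k)
    (hj : j < k) : xs.getD j [] = ys.getD j [] := by
  have := congrArg (fun l => List.getD l j ([] : List Char)) h
  simpa [List.getD_eq_getElem?_getD, List.getElem?_take, hj] using this

lemma pvTakeSet (l : List (List Char)) (i : Nat) (v : List Char) (h : i < l.length) :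
    (l.set i v).take (i + 1) = l.take i ++ [v] := by
  rw [List.set_eq_take_cons_drop v h]
  rw [show i + 1 = (l.take i).length + 1 by simp [List.length_take]; omega]
  rw [List.take_append]
  simp

lemma pvRepSucc (c : Char) (g : Int) (h : 0 ≤ g) : pvRep c (1 + g) = c :: pvRep c g := by
  unfold pvRep
  rw [show (1 + g).toNat = g.toNat + 1 by omega, List.replicate_succ]

-- the full induction statement for pvRecurA at a given fuel
def pvSpecA (w : List Char) (fci fuel : Nat) : Prop :=
  ∀ ci parts rem, ci + fuel = fci →
    parts.length = w.length →
    (∀ j, ci ≤ j → j < w.length → j ≠ fci → ∃ tl, parts.getD j [] = w.getD j ' ' :: tl) →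
    (0 ≤ rem → ∃ tl, parts.getD fci [] = w.getD fci ' ' :: tl) →
    (∀ j, fci < j → j < w.length → parts.getD j [] = [w.getD j ' ']) →
    (pvRecurA w fci w.length fuel ci parts rem).1
        = (pvE w fci fuel ci rem).map (fun suf => String.ofList ((parts.take ci).flatten ++ suf))
      ∧ (pvRecurA w fci w.length fuel ci parts rem).2.length = w.length
      ∧ (pvRecurA w fci w.length fuel ci parts rem).2.take ci = parts.take ci
      ∧ (∀ j, ci ≤ j → j < w.length → j ≠ fci →
          ∃ tl, (pvRecurA w fci w.length fuel ci parts rem).2.getD j [] = w.getD j ' ' :: tl)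
      ∧ (0 ≤ rem → ∃ tl, (pvRecurA w fci w.length fuel ci parts rem).2.getD fci [] = w.getD fci ' ' :: tl)
      ∧ (∀ j, fci < j → j < w.length →
          (pvRecurA w fci w.length fuel ci parts rem).2.getD j [] = [w.getD j ' '])

lemma pvLoopAux (w : List Char) (fci : Nat) (hf : fci < w.length) (fuel ci : Nat) (rem : Int)
    (hci : ci < fci) (hfuel : ci + 1 + fuel = fci) (IH : pvSpecA w fci fuel)
    (P0 : List (List Char)) :
    ∀ (gs : List Int), (∀ g ∈ gs, 0 ≤ g ∧ g ≤ rem) →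
    ∀ (acc : List String) (ps : List (List Char)),
      ps.length = w.length →
      (∀ j, ci ≤ j → j < w.length → j ≠ fci → ∃ tl, ps.getD j [] = w.getD j ' ' :: tl) →
      (0 ≤ rem → ∃ tl, ps.getD fci [] = w.getD fci ' ' :: tl) →
      (∀ j, fci < j → j < w.length → ps.getD j [] = [w.getD j ' ']) →
      ps.take ci = P0 →
      (gs.foldl (fun st g =>
          let c := (st.2.getD ci []).headD ' '
          let parts' := st.2.set ci (pvRep c (1 + g))
          let r := pvRecurA w fci w.length fuel (ci + 1) parts' (rem - g)
          (st.1 ++ r.1, r.2)) (acc, ps)).1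
        = acc ++ gs.flatMap (fun g => (pvE w fci fuel (ci + 1) (rem - g)).map
            (fun suf => String.ofList (P0.flatten ++ (pvRep (w.getD ci ' ') (1 + g) ++ suf))))
      ∧ (gs.foldl (fun st g =>
          let c := (st.2.getD ci []).headD ' '
          let parts' := st.2.set ci (pvRep c (1 + g))
          let r := pvRecurA w fci w.length fuel (ci + 1) parts' (rem - g)
          (st.1 ++ r.1, r.2)) (acc, ps)).2.length = w.length
      ∧ (gs.foldl (fun st g =>
          let c := (st.2.getD ci []).headD ' '
          let parts' := st.2.set ci (pvRep c (1 + g))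
          let r := pvRecurA w fci w.length fuel (ci + 1) parts' (rem - g)
          (st.1 ++ r.1, r.2)) (acc, ps)).2.take ci = P0
      ∧ (∀ j, ci ≤ j → j < w.length → j ≠ fci →
          ∃ tl, (gs.foldl (fun st g =>
          let c := (st.2.getD ci []).headD ' '
          let parts' := st.2.set ci (pvRep c (1 + g))
          let r := pvRecurA w fci w.length fuel (ci + 1) parts' (rem - g)
          (st.1 ++ r.1, r.2)) (acc, ps)).2.getD j [] = w.getD j ' ' :: tl)
      ∧ (0 ≤ rem → ∃ tl, (gs.foldl (fun st g =>
          let c := (st.2.getD ci []).headD ' '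
          let parts' := st.2.set ci (pvRep c (1 + g))
          let r := pvRecurA w fci w.length fuel (ci + 1) parts' (rem - g)
          (st.1 ++ r.1, r.2)) (acc, ps)).2.getD fci [] = w.getD fci ' ' :: tl)
      ∧ (∀ j, fci < j → j < w.length → (gs.foldl (fun st g =>
          let c := (st.2.getD ci []).headD ' '
          let parts' := st.2.set ci (pvRep c (1 + g))
          let r := pvRecurA w fci w.length fuel (ci + 1) parts' (rem - g)
          (st.1 ++ r.1, r.2)) (acc, ps)).2.getD j [] = [w.getD j ' ']) := by
  intro gs
  induction gs with
  | nil =>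
    intro _ acc ps hlen hheads hfhead hsing htake
    simpa using ⟨hlen, htake, hheads, hfhead, hsing⟩
  | cons g gs ihg =>
    intro hb acc ps hlen hheads hfhead hsing htake
    have hcilt : ci < w.length := by omega
    have hg := hb g (by simp)
    have hrem0 : (0 : Int) ≤ rem := le_trans hg.1 hg.2
    have hc : (ps.getD ci []).headD ' ' = w.getD ci ' ' := by
      obtain ⟨tl, htl⟩ := hheads ci le_rfl hcilt (by omega)
      rw [htl]; rfl
    rw [List.foldl_cons]
    simp only [hc]
    set v := pvRep (w.getD ci ' ') (1 + g) with hv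
    set ps' := ps.set ci v with hps'
    have hIH := IH (ci + 1) ps' (rem - g) (by omega)
      (by simp [hps', hlen])
      (by intro j hj hjl hjne
          rw [hps', pvSetGetDNe ps ci j v (by omega)]
          exact hheads j (by omega) hjl hjne)
      (by intro _
          rw [hps', pvSetGetDNe ps ci fci v (by omega)]
          exact hfhead hrem0)
      (by intro j hj hjl
          rw [hps', pvSetGetDNe ps ci j v (by omega)]
          exact hsing j hj hjl)
    obtain ⟨e1, e2, e3, e4, e5, e6⟩ := hIH
    set r := pvRecurA w fci w.length fuel (ci + 1) ps' (rem - g) with hr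
    have htkv : ps'.take (ci + 1) = P0 ++ [v] := by
      rw [hps', pvTakeSet ps ci v (by omega), htake]
    have hrtake : r.2.take ci = P0 := by
      have h1 : r.2.take ci = (r.2.take (ci + 1)).take ci := by
        rw [List.take_take]; congr 1; omega
      rw [h1, e3, htkv]
      rw [List.take_append_of_le_length (by
        have : P0.length = ci := by
          rw [← htake]; simp [List.length_take]; omega
        omega)]
      have hP0 : P0.length = ci := by rw [← htake]; simp [List.length_take]; omega
      rw [← hP0]
      simp
    have hr1 : r.1 = (pvE w fci fuel (ci + 1) (rem - g)).map
        (fun suf => String.ofList (P0.flatten ++ (v ++ suf))) := by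
      rw [e1, htkv]
      simp [List.flatten_append, List.append_assoc]
    have hnext := ihg (fun g' hg' => hb g' (by simp [hg'])) (acc ++ r.1) r.2 e2
      (by intro j hj hjl hjne
          rcases Nat.eq_or_lt_of_le hj with heq | hlt
          · have hjv : r.2.getD ci [] = v := by
              rw [pvGetDTake r.2 ps' (ci + 1) ci e3 (by omega)]
              rw [hps', pvSetGetDSelf ps ci v (by omega)]
            rw [← heq, hjv, hv, pvRepSucc _ g hg.1]
            exact ⟨_, rfl⟩
          · exact e4 j (by omega) hjl hjne)
      (fun _ => e5 (by omega))
      e6 hrtake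
    obtain ⟨a1, a2, a3, a4, a5, a6⟩ := hnext
    refine ⟨?_, a2, a3, a4, a5, a6⟩
    rw [a1, hr1, List.flatMap_cons]
    simp [List.append_assoc]
    intro a _
    rfl

lemma pvRecurA_spec (w : List Char) (fci : Nat) (hf : fci < w.length) :
    ∀ fuel, pvSpecA w fci fuel := by
  intro fuel
  induction fuel with
  | zero =>
    intro ci parts rem hci hlen hheads hfhead hsing
    have hfc : ci = fci := by omega
    subst hfc
    rw [pvRecurA, if_pos rfl]
    have hrep : pvRep ((parts.getD ci []).headD ' ') (1 + rem)
        = pvRep (w.getD ci ' ') (1 + rem) := by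
      by_cases hr : 0 ≤ rem
      · obtain ⟨tl, htl⟩ := hfhead hr
        rw [htl]; rfl
      · unfold pvRep
        rw [show (1 + rem).toNat = 0 by omega]
        rfl
    have hflat : ∀ V : List Char, (parts.set ci V).flatten
        = (parts.take ci).flatten ++ (V ++ w.drop (ci + 1)) := by
      intro V
      rw [List.set_eq_take_cons_drop V (by omega), List.flatten_append, List.flatten_cons]
      rw [pvDropFlatten w parts (ci + 1) hlen (fun j hj hjl => hsing j (by omega) hjl)]
    simp only [hrep]
    rw [pvE, if_pos rfl]
    by_cases hcc : ci = w.length - 1 ∧ 0 < rem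
    · rw [if_pos hcc, if_pos hcc]
      obtain ⟨hlast, hrem⟩ := hcc
      have hps1 : (parts.set ci (pvRep (w.getD ci ' ') (1 + rem))).getD ci []
          = pvRep (w.getD ci ' ') (1 + rem) :=
        pvSetGetDSelf parts ci _ (by omega)
      have hc2 : ((parts.set ci (pvRep (w.getD ci ' ') (1 + rem))).getD ci []).headD ' '
          = w.getD ci ' ' := by
        rw [hps1, pvRepSucc _ rem (by omega)]; rfl
      simp only [hc2, List.set_set]
      constructor
      · rw [hflat, hflat]
        simp [List.append_assoc]
      refine ⟨by simp [hlen], List.take_set_of_le le_rfl, ?_, ?_, ?_⟩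
      · intro j hj hjl hjne
        rw [pvSetGetDNe parts ci j _ (by omega)]
        exact hheads j hj hjl hjne
      · intro _
        rw [pvSetGetDSelf parts ci _ (by omega)]
        refine ⟨List.replicate ((1 + rem - 1).toNat - 1) (w.getD ci ' ') ++ ['e'], ?_⟩
        unfold pvRep
        rw [show (1 + rem - 1).toNat = ((1 + rem - 1).toNat - 1) + 1 by omega,
          List.replicate_succ]
        rfl
      · intro j hj hjl
        rw [pvSetGetDNe parts ci j _ (by omega)]
        exact hsing j hj hjl
    · rw [if_neg hcc, if_neg hcc]
      constructor
      · rw [hflat]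
        simp
      refine ⟨by simp [hlen], List.take_set_of_le le_rfl, ?_, ?_, ?_⟩
      · intro j hj hjl hjne
        rw [pvSetGetDNe parts ci j _ (by omega)]
        exact hheads j hj hjl hjne
      · intro hr
        rw [pvSetGetDSelf parts ci _ (by omega), pvRepSucc _ rem hr]
        exact ⟨_, rfl⟩
      · intro j hj hjl
        rw [pvSetGetDNe parts ci j _ (by omega)]
        exact hsing j hj hjl
  | succ fuel ih =>
    intro ci parts rem hci hlen hheads hfhead hsing
    have hlt : ci < fci := by omega
    have hcilt : ci < w.length := by omega
    have hc : (parts.getD ci []).headD ' ' = w.getD ci ' ' := by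
      obtain ⟨tl, htl⟩ := hheads ci le_rfl hcilt (by omega)
      rw [htl]; rfl
    rw [pvRecurA, if_neg (by omega : ¬ ci = fci)]
    simp only [hc]
    rw [pvE, if_neg (by omega : ¬ ci = fci)]
    by_cases hp : pvIsCons (w.getD ci ' ') = true
    · rw [if_pos hp]
      have hbound : ∀ g ∈ PySem.List.pyRange 0 (rem + 1) 1, 0 ≤ g ∧ g ≤ rem := by
        intro g hg
        have := PySem.List.mem_pyRange_one.mp hg
        omega
      obtain ⟨a1, a2, a3, a4, a5, a6⟩ := pvLoopAux w fci hf fuel ci rem hlt (by omega) ih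
        (parts.take ci) (PySem.List.pyRange 0 (rem + 1) 1) hbound [] parts hlen hheads
        hfhead hsing rfl
      refine ⟨?_, a2, a3, a4, a5, a6⟩
      rw [a1, List.map_flatMap]
      simp only [List.nil_append, List.map_map]
      rfl
    · rw [if_neg hp]
      rw [PySem.List.pyRange_one_singleton 0]
      rw [List.foldl_cons, List.foldl_nil]
      simp only [hc]
      set v := pvRep (w.getD ci ' ') (1 + 0) with hv
      set ps' := parts.set ci v with hps'
      obtain ⟨e1, e2, e3, e4, e5, e6⟩ := ih (ci + 1) ps' (rem - 0) (by omega)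
        (by simp [hps', hlen])
        (by intro j hj hjl hjne
            rw [hps', pvSetGetDNe parts ci j v (by omega)]
            exact hheads j (by omega) hjl hjne)
        (by intro hr
            rw [hps', pvSetGetDNe parts ci fci v (by omega)]
            exact hfhead (by omega))
        (by intro j hj hjl
            rw [hps', pvSetGetDNe parts ci j v (by omega)]
            exact hsing j hj hjl)
      set r := pvRecurA w fci w.length fuel (ci + 1) ps' (rem - 0) with hr
      have htkv : ps'.take (ci + 1) = parts.take ci ++ [v] := by
        rw [hps', pvTakeSet parts ci v (by omega)]
      have hrtake : r.2.take ci = parts.take ci := by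
        have h1 : r.2.take ci = (r.2.take (ci + 1)).take ci := by
          rw [List.take_take]; congr 1; omega
        rw [h1, e3, htkv, List.take_append_of_le_length (by simp [List.length_take]; omega)]
        rw [List.take_take]
        congr 1
        omega
      refine ⟨?_, e2, hrtake, ?_, ?_, e6⟩
      · rw [List.nil_append, e1, htkv]
        simp only [List.flatMap_cons, List.flatMap_nil, List.append_nil, List.map_map]
        simp [List.flatten_append, List.append_assoc]
        intro a _
        rfl
      · intro j hj hjl hjne
        rcases Nat.eq_or_lt_of_le hj with heq | hlt2
        · have hjv : r.2.getD ci [] = v := by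
            rw [pvGetDTake r.2 ps' (ci + 1) ci e3 (by omega)]
            rw [hps', pvSetGetDSelf parts ci v (by omega)]
          rw [← heq, hjv, hv, pvRepSucc _ 0 le_rfl]
          exact ⟨_, rfl⟩
        · exact e4 j (by omega) hjl hjne
      · intro hr0
        exact e5 (by omega)

lemma pvZipFst (l1 : List Nat) (l2 : List Int) :
    (l1.zip l2).map Prod.fst = l1.take l2.length := by
  induction l1 generalizing l2 with
  | nil => simp
  | cons a l ih =>
    cases l2 with
    | nil => simp
    | cons b m => simp [ih]

lemma pvBuild (L : Int) : ∀ (ps : List Nat) (ts : List (List Int)),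
    ps.foldl (fun ts _ => ts.flatMap (fun t =>
      (PySem.List.pyRange 0 (L - t.sum + 1) 1).map (fun g => t ++ [g]))) ts
    = ts.flatMap (fun t => (pvT ps.length (L - t.sum)).map (fun u => t ++ u)) := by
  intro ps
  induction ps with
  | nil =>
    intro ts
    simp [pvT]
  | cons p ps ih =>
    intro ts
    rw [List.foldl_cons, ih, List.flatMap_assoc]
    congr 1
    funext t
    rw [pvFlatMapMap]
    simp only [List.length_cons, pvT, List.map_flatMap, List.map_map]
    congr 1
    funext g
    have hsum : L - (t ++ [g]).sum = L - t.sum - g := by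
      simp [List.sum_append]; ring
    rw [hsum]
    congr 1
    funext u
    simp [List.append_assoc]

lemma pvMkLook : ∀ (l : List (Nat × Int)) (i : Nat),
    (PySem.Dict.mk l).getD i 0 = pvLook l i := by
  intro l
  induction l with
  | nil =>
    intro i
    rfl
  | cons a r ih =>
    intro i
    obtain ⟨k, v⟩ := a
    rw [PySem.Dict.getD_eq_get?_getD, PySem.Dict.get?_mk_cons]
    by_cases hk : k = i
    · simp [pvLook, hk]
    · rw [if_neg (by simpa using hk)]
      rw [← PySem.Dict.getD_eq_get?_getD, ih i]
      simp [pvLook, hk]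

lemma pvDictLook (l : List (Nat × Int)) (hnd : (l.map Prod.fst).Nodup) (i : Nat) :
    (PySem.Dict.ofList l).getD i 0 = pvLook l i := by
  have hitems : (PySem.Dict.ofList l).items = l := by
    have h := PySem.Dict.items_foldl_insert_fresh l Prod.fst Prod.snd PySem.Dict.empty
      (fun a _ => by simp) hnd
    simpa using h
  have : PySem.Dict.ofList l = PySem.Dict.mk l := PySem.Dict.ext hitems
  rw [this, pvMkLook]

-- ===== VERDICT (by name: the statement is the Claim_ definition above) =====
theorem recover_word_spec : Claim_equal_recover_word := by
  unfold Claim_equal_recover_word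
  intro word L hdom hpre
  unfold Spec_recover_word
  unfold Pre_recover_word at hpre
  unfold recover_word recover_word_alt
  dsimp only
  set w := word.toList with hw
  set cons := (List.range w.length).filter (fun i => pvIsCons (w.getD i ' ')) with hcons
  have hne : cons ≠ [] := by
    rw [List.any_eq_true] at hpre
    obtain ⟨c, hc, hcp⟩ := hpre
    obtain ⟨i, hi, hgi⟩ := List.mem_iff_getElem.mp hc
    intro hnil
    have hin : i ∈ cons := by
      rw [hcons]
      apply List.mem_filter.mpr
      refine ⟨List.mem_range.mpr hi, ?_⟩
      rw [List.getD_eq_getElem w ' ' hi, hgi]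
      exact hcp
    rw [hnil] at hin
    simp at hin
  obtain ⟨fci, hfci⟩ : ∃ fci, PySem.List.max? cons (fun i => i) = some fci := by
    cases h : PySem.List.max? cons (fun i => i) with
    | none => exact absurd ((PySem.List.max?_eq_none_iff cons _).mp h) hne
    | some m => exact ⟨m, rfl⟩
  rw [hfci]
  dsimp only
  have hmem : fci ∈ cons := PySem.List.max?_mem hfci
  have hmax : ∀ y ∈ cons, y ≤ fci := PySem.List.max?_isMax hfci
  have hmemf : fci ∈ (List.range w.length).filter (fun i => pvIsCons (w.getD i ' ')) := by
    rw [← hcons]; exact hmem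
  have hflen : fci < w.length := List.mem_range.mp (List.mem_filter.mp hmemf).1
  have hpfci : pvIsCons (w.getD fci ' ') = true := by
    have := (List.mem_filter.mp hmemf).2
    simpa using this
  have hdecomp : cons = pvConsList w 0 fci ++ [fci] := by
    rw [hcons, List.range_eq_range']
    have h1 : List.range' 0 w.length
        = List.range' 0 fci ++ List.range' fci (w.length - fci) := by
      rw [show List.range' fci (w.length - fci) = List.range' (0 + 1 * fci) (w.length - fci)
        by congr 1; omega]
      rw [List.range'_append]
      congr 1
      omega
    rw [h1, List.filter_append]
    congr 1
    rw [pvRangeCons (by omega : 0 < w.length - fci), List.filter_cons, if_pos hpfci]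
    have h2 : (List.range' (fci + 1) (w.length - fci - 1)).filter
        (fun i => pvIsCons (w.getD i ' ')) = [] := by
      rw [List.filter_eq_nil_iff]
      intro j hj hpj
      have hjb := List.mem_range'_1.mp hj
      have hjc : j ∈ cons := by
        rw [hcons]
        exact List.mem_filter.mpr ⟨List.mem_range.mpr (by omega), hpj⟩
      have := hmax j hjc
      omega
    rw [h2]
  -- A side
  have hm : ∀ j, j < w.length → (w.map (fun c => [c])).getD j [] = [w.getD j ' '] := by
    intro j hj
    rw [List.getD_eq_getElem _ _ (by simpa using hj), List.getD_eq_getElem w ' ' hj]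
    simp
  obtain ⟨e1, -, -, -, -, -⟩ := pvRecurA_spec w fci hflen fci 0 (w.map (fun c => [c])) L
    (by omega) (by simp)
    (fun j hj hjl _ => ⟨[], hm j hjl⟩)
    (fun _ => ⟨[], hm fci hflen⟩)
    (fun j _ hjl => hm j hjl)
  rw [e1]
  simp only [List.take_zero, List.flatten_nil, List.nil_append]
  rw [pvE_eq_T w fci hflen fci 0 L (by omega)]
  -- B side
  rw [PySem.List.slice_to_neg_one, hdecomp, List.dropLast_concat]
  rw [pvBuild L (pvConsList w 0 fci) [[]]]
  simp only [List.flatMap_cons, List.flatMap_nil, List.append_nil, List.sum_nil, sub_zero]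
  have hid : (pvT (pvConsList w 0 fci).length L).map (fun u => [] ++ u)
      = pvT (pvConsList w 0 fci).length L := by simp
  rw [hid, List.map_flatMap]
  congr 1
  funext t
  have hnd : (((pvConsList w 0 fci).zip t).map Prod.fst).Nodup := by
    rw [pvZipFst]
    exact (List.Nodup.filter _ (List.nodup_range' 1)).sublist
      (List.take_sublist _ _)
  have hlook : ∀ i, (PySem.Dict.ofList ((pvConsList w 0 fci).zip t)).getD i 0
      = pvLook ((pvConsList w 0 fci).zip t) i := pvDictLook _ hnd
  have hs : ((List.range w.length).map (fun i =>
        if i = fci then pvRep (w.getD i ' ') (1 + (L - t.sum))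
        else pvRep (w.getD i ' ')
          (1 + (PySem.Dict.ofList ((pvConsList w 0 fci).zip t)).getD i 0))).flatten
      = pvRender w fci 0 ((pvConsList w 0 fci).zip t) (L - t.sum) := by
    unfold pvRender
    rw [List.range_eq_range']
    congr 1
    apply List.map_congr_left
    intro i _
    rw [hlook i]
  rw [hs]
  unfold pvOuts
  rw [PySem.List.slice_to_neg_one]
  simp [List.map_cons, apply_ite (List.map String.ofList)]
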